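-- pv_equiv track=rewrite | github.com/umihico/umihico_commons | google_search/csv_wrapper.py | convert_list_of_dicts_to_list_of_list
-- ===== SOURCE A (Python) =====
-- def convert_list_of_dicts_to_list_of_list(list_of_dict, missing_value='__NoValue__'):
--     fieldnames = []
--     for dict_ in list_of_dict:
--         index_ = 0
--         for key in dict_.keys():
--             if key in fieldnames:
--                 index_ = fieldnames.index(key)
--             else:
--                 index_ += 1
--                 fieldnames.insert(index_, key)
--     list_of_list = [fieldnames, ]
--     for dict_ in list_of_dict:
--         row = [dict_.get(key, missing_value) for key in fieldnames]
--         list_of_list.append(row)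
--     return list_of_list
-- ===== SOURCE B (Python) =====
-- def convert_list_of_dicts_to_list_of_list(list_of_dict, missing_value='__NoValue__'):
--     # The field schema is a linked list (succ: key -> following key), so each
--     # new key is spliced in right after the current field by two pointer updates;
--     # each row's walk starts from the leading field.
--     succ = {}          # key -> the key that follows it (None at the tail)
--     head = None        # leading field of the schema
--     for dict_ in list_of_dict:
--         cur = head
--         for key in dict_:
--             if key in succ:
--                 cur = key
--             elif cur is None:      # schema still empty
--                 succ[key] = head
--                 head = cur = key
--             else:                  # splice key in after cur
--                 succ[key] = succ[cur]
--                 succ[cur] = key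
--                 cur = key
--     fieldnames = []
--     key = head
--     while key is not None:
--         fieldnames.append(key)
--         key = succ[key]
--     return [fieldnames] + [[d.get(key, missing_value) for key in fieldnames]
--                            for d in list_of_dict]
-- ===== Notes on version B (the rewrite author's own statement) =====
-- stated objective: alternative
-- what changed: A maintains the field schema as one Python list with repeated membership tests, .index scans and shifting list.insert; B keeps the schema as a linked list encoded in a dict (key -> following key) with a current pointer, so membership and splicing a new key in after the current field are O(1) dict operations.
import Mathlib
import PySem

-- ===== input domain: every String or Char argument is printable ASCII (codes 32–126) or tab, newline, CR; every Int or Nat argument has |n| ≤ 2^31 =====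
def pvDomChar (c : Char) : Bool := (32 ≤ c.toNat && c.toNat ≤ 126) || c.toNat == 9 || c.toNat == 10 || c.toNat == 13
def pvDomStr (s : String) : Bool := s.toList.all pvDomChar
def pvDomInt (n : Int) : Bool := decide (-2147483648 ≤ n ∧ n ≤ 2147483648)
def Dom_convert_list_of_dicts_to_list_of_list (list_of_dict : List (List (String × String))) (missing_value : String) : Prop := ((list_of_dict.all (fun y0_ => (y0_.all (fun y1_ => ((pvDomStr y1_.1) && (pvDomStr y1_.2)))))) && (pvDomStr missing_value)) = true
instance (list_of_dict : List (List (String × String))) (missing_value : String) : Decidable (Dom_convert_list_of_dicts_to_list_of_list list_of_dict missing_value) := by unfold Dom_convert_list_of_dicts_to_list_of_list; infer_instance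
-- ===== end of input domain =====

-- B keeps the field schema as a linked list encoded in a dict (key -> following
-- key) with a current pointer and splices each new key in after the current field,
-- instead of A's membership / .index / list.insert passes over one Python list
-- (objective: alternative; equal return value proved below).

-- ===== PORT A =====
-- inner loop body of A: state = (fieldnames, index_)
def pvAStep (st : List String × Int) (key : String) : List String × Int :=
  if key ∈ st.1 then
    -- index_ = fieldnames.index(key); guarded by 'key in fieldnames', so .index cannot raise
    (st.1, (((PySem.List.index? st.1 key).getD 0 : Nat) : Int))
  else
    (PySem.List.insert st.1 (st.2 + 1) key, st.2 + 1)

-- the fieldnames-building loop of A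
def pvAFields (list_of_dict : List (List (String × String))) : List String :=
  list_of_dict.foldl
    (fun fieldnames dict_ => ((PySem.Dict.ofList dict_).keys.foldl pvAStep (fieldnames, 0)).1)
    []

def convert_list_of_dicts_to_list_of_list (list_of_dict : List (List (String × String))) (missing_value : String) : List (List String) :=
  let fieldnames := pvAFields list_of_dict
  -- list_of_list = [fieldnames]; for dict_ in list_of_dict: list_of_list.append(row)
  list_of_dict.foldl
    (fun acc dict_ => acc ++ [fieldnames.map (fun key => (PySem.Dict.ofList dict_).getD key missing_value)])
    [fieldnames]

-- ===== PORT B =====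
-- inner loop body of B: state = (succ, head, cur)
def pvBStep (st : PySem.Dict String (Option String) × Option String × Option String)
    (key : String) : PySem.Dict String (Option String) × Option String × Option String :=
  if st.1.contains key then
    (st.1, st.2.1, some key)
  else
    match st.2.2 with
    | none => (st.1.insert key st.2.1, some key, some key)        -- schema still empty
    | some c =>
      -- splice key in after cur: succ[key] = succ[cur]; succ[cur] = key
      -- (succ[cur] is a plain lookup; cur is always a schema key, so KeyError is impossible)
      ((st.1.insert key ((st.1.get? c).getD none)).insert c (some key), st.2.1, some key)

-- the schema-building loop of B; each row starts with cur = head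
def pvBSchema (list_of_dict : List (List (String × String))) :
    PySem.Dict String (Option String) × Option String :=
  list_of_dict.foldl
    (fun st dict_ =>
      let r := (PySem.Dict.ofList dict_).keys.foldl pvBStep (st.1, st.2, st.2)
      (r.1, r.2.1))
    (PySem.Dict.empty, none)

-- the 'while key is not None' walk; fuel = number of schema keys (the chain is
-- acyclic and visits each key once, so this fuel is exact, proved in pvWalk_chain)
def pvBWalk (fuel : Nat) (succ : PySem.Dict String (Option String)) :
    Option String → List String
  | none => []
  | some k =>
    match fuel with
    | 0 => []
    | f + 1 => k :: pvBWalk f succ ((succ.get? k).getD none)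

def convert_list_of_dicts_to_list_of_list_alt (list_of_dict : List (List (String × String))) (missing_value : String) : List (List String) :=
  let st := pvBSchema list_of_dict
  let fieldnames := pvBWalk st.1.size st.1 st.2
  [fieldnames] ++ list_of_dict.map (fun dict_ => fieldnames.map (fun key => (PySem.Dict.ofList dict_).getD key missing_value))

-- ===== PRECONDITION & SPEC =====
def Spec_convert_list_of_dicts_to_list_of_list (list_of_dict : List (List (String × String))) (missing_value : String) (out : List (List String)) : Prop := out = convert_list_of_dicts_to_list_of_list_alt list_of_dict missing_value
instance (list_of_dict : List (List (String × String))) (missing_value : String) (out : List (List String)) : Decidable (Spec_convert_list_of_dicts_to_list_of_list list_of_dict missing_value out) := by unfold Spec_convert_list_of_dicts_to_list_of_list; infer_instance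

-- ===== CLAIM (what is proved, stated in full; the proofs are below) =====
def Claim_equal_convert_list_of_dicts_to_list_of_list : Prop := ∀ (list_of_dict : List (List (String × String))) (missing_value : String), Dom_convert_list_of_dicts_to_list_of_list list_of_dict missing_value → Spec_convert_list_of_dicts_to_list_of_list list_of_dict missing_value (convert_list_of_dicts_to_list_of_list list_of_dict missing_value)

-- ===== LEMMAS AND PROOFS =====

-- (succ, h) represents the list l as a linked chain
def pvChain (succ : PySem.Dict String (Option String)) : Option String → List String → Prop
  | h, [] => h = none
  | h, x :: xs => h = some x ∧ pvChain succ ((succ.get? x).getD none) xs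

theorem pvChain_congr {succ succ' : PySem.Dict String (Option String)} {h : Option String}
    {l : List String} (hx : ∀ x ∈ l, succ'.get? x = succ.get? x) (hc : pvChain succ h l) :
    pvChain succ' h l := by
  induction l generalizing h with
  | nil => exact hc
  | cons a t ih =>
    obtain ⟨h1, h2⟩ := hc
    exact ⟨h1, by
      rw [hx a (by simp)]
      exact ih (fun x hxm => hx x (by simp [hxm])) h2⟩

-- splicing a fresh key right after c keeps the chain, with the key inserted after c
theorem pvChain_splice (succ : PySem.Dict String (Option String)) (h : Option String)
    (pre post : List String) (c k : String)
    (hc : pvChain succ h (pre ++ c :: post)) (hnd : (pre ++ c :: post).Nodup)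
    (hk : k ∉ pre ++ c :: post) :
    pvChain ((succ.insert k ((succ.get? c).getD none)).insert c (some k)) h
      (pre ++ c :: k :: post) := by
  induction pre generalizing h with
  | nil =>
    obtain ⟨h1, h2⟩ := hc
    refine ⟨h1, ?_⟩
    rw [PySem.Dict.get?_insert_self]
    refine ⟨rfl, ?_⟩
    have hck : k ≠ c := by simp at hk; tauto
    rw [PySem.Dict.get?_insert_of_ne _ _ hck, PySem.Dict.get?_insert_self]
    show pvChain _ ((succ.get? c).getD none) post
    refine pvChain_congr (fun x hxm => ?_) h2
    have hxc : x ≠ c := by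
      intro hh; subst hh
      simp at hnd; tauto
    have hxk : x ≠ k := by
      intro hh; subst hh
      simp at hk; tauto
    rw [PySem.Dict.get?_insert_of_ne _ _ hxc, PySem.Dict.get?_insert_of_ne _ _ hxk]
  | cons a t ih =>
    obtain ⟨h1, h2⟩ := hc
    refine ⟨h1, ?_⟩
    have hac : a ≠ c := by simp at hnd; tauto
    have hak : a ≠ k := by intro hh; subst hh; simp at hk
    rw [PySem.Dict.get?_insert_of_ne _ _ hac, PySem.Dict.get?_insert_of_ne _ _ hak]
    exact ih _ h2 (by simp_all) (by simp_all)

-- walking a chain with enough fuel reproduces the list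
theorem pvWalk_chain {succ : PySem.Dict String (Option String)} {h : Option String}
    {l : List String} (hc : pvChain succ h l) :
    ∀ fuel, l.length ≤ fuel → pvBWalk fuel succ h = l := by
  induction l generalizing h with
  | nil => intro fuel _; rw [hc]; cases fuel <;> rfl
  | cons a t ih =>
    intro fuel hf
    obtain ⟨h1, h2⟩ := hc
    subst h1
    cases fuel with
    | zero => simp at hf
    | succ f =>
      show a :: pvBWalk f succ _ = a :: t
      rw [ih h2 f (by simpa using hf)]

-- Python list.insert at a nonnegative position clamps to the end
theorem pv_insert_eq (pre post : List String) (i : Int) (v : String) (h0 : 0 ≤ i)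
    (h : (pre.length : Int) = min i ((pre ++ post).length : Int)) :
    PySem.List.insert (pre ++ post) i v = pre ++ v :: post := by
  have hlen : (min i ((pre ++ post).length : Int)).toNat = pre.length := by omega
  have h1 : ¬ (1 : Int) < 0 := by norm_num
  have h2 : ¬ i < 0 := by omega
  simp only [PySem.List.insert, PySem.List.sliceIndices, if_neg h1, if_neg h2]
  rw [hlen, List.take_left, List.drop_left]

-- simulation invariant between A's inner state (F, idx) and B's (succ, head, cur):
-- the chain spells out F, membership agrees, and cur is the field at position
-- min(idx+1, |F|) - 1 (none iff F is empty)
def pvInv (F : List String) (idx : Int) (succ : PySem.Dict String (Option String))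
    (head cur : Option String) : Prop :=
  0 ≤ idx ∧ F.Nodup ∧ pvChain succ head F ∧ (∀ k, succ.contains k = true ↔ k ∈ F) ∧
    cur = (F.take (min (idx + 1) (F.length : Int)).toNat).getLast?

theorem pvStepInv (F : List String) (idx : Int) (succ : PySem.Dict String (Option String))
    (head cur : Option String) (key : String) (h : pvInv F idx succ head cur) :
    pvInv (pvAStep (F, idx) key).1 (pvAStep (F, idx) key).2
      (pvBStep (succ, head, cur) key).1 (pvBStep (succ, head, cur) key).2.1
      (pvBStep (succ, head, cur) key).2.2 := by
  obtain ⟨hidx, hnd, hch, hmem, hcur⟩ := h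
  by_cases hk : key ∈ F
  · -- existing key: A looks up its index, B moves cur onto the key
    have hcont : succ.contains key = true := (hmem key).mpr hk
    obtain ⟨i, hi⟩ := Option.isSome_iff_exists.mp ((PySem.List.index?_isSome_iff F key).mpr hk)
    obtain ⟨hilt, hFi, -⟩ := PySem.List.getElem_of_index?_eq_some hi
    simp only [pvAStep, pvBStep, if_pos hk, if_pos hcont, hi, Option.getD_some]
    refine ⟨by positivity, hnd, hch, hmem, ?_⟩
    have hmin : (min ((i : Int) + 1) (F.length : Int)).toNat = i + 1 := by omega
    rw [hmin, List.getLast?_eq_getElem?]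
    have hlen : (F.take (i + 1)).length = i + 1 := by simp; omega
    rw [hlen]
    simp only [Nat.add_sub_cancel]
    rw [List.getElem?_take, if_pos (by omega)]
    rw [List.getElem?_eq_getElem hilt, hFi]
  · -- new key: A inserts at index_+1 (clamped) = after cur; B splices it in after cur
    have hcont : ¬ succ.contains key = true := fun hc => hk ((hmem key).mp hc)
    simp only [pvAStep, pvBStep, if_neg hk, if_neg hcont]
    set p : Int := min (idx + 1) (F.length : Int) with hp
    have hppos : 0 ≤ p := by omega
    have hpre : ((F.take p.toNat).length : Int) = min (idx + 1) ((F.take p.toNat ++ F.drop p.toNat).length : Int) := by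
      simp; omega
    have hins : PySem.List.insert F (idx + 1) key = F.take p.toNat ++ key :: F.drop p.toNat := by
      conv_lhs => rw [← List.take_append_drop p.toNat F]
      exact pv_insert_eq _ _ _ _ (by omega) hpre
    match hcase : cur with
    | none =>
      -- cur is None: the schema is empty (the taken prefix is empty only when F is)
      have htake : F.take p.toNat = [] := List.getLast?_eq_none_iff.mp hcur.symm
      have hFnil : F = [] := by
        have hlen0 := congrArg List.length htake
        simp only [List.length_take, List.length_nil] at hlen0
        cases F with
        | nil => rfl
        | cons x xs =>
          exfalso
          have hl : (x :: xs).length = xs.length + 1 := by simp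
          omega
      subst hFnil
      have hhead : head = none := hch
      simp only [List.take_nil, List.drop_nil, List.nil_append] at hins
      rw [hins]
      refine ⟨by omega, by simp, ?_, ?_, ?_⟩
      · -- chain for [key]
        refine ⟨rfl, ?_⟩
        show ((succ.insert key head).get? key).getD none = none
        rw [PySem.Dict.get?_insert_self, hhead]
        rfl
      · intro k
        have hnone : succ.contains k = false := by
          have := hmem k
          simp only [List.not_mem_nil, iff_false] at this
          exact Bool.not_eq_true _ ▸ (by simpa using this)
        rw [PySem.Dict.contains_insert, hnone]
        simp
      · have hmin : (min (idx + 1 + 1) ((([key] : List String).length : Nat) : Int)).toNat = 1 := by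
          simp; omega
        rw [hmin]
        rfl
    | some c =>
      -- cur = some c: c is the last element of the taken prefix
      have hget : (F.take p.toNat).getLast? = some c := hcur.symm
      have hpne : F.take p.toNat ≠ [] := by
        intro hh
        rw [hh] at hget
        simp at hget
      obtain ⟨pre', hpre'⟩ : ∃ pre', F.take p.toNat = pre' ++ [c] := by
        refine ⟨(F.take p.toNat).dropLast, ?_⟩
        have hlast : (F.take p.toNat).getLast hpne = c := by
          rw [List.getLast?_eq_some_getLast hpne] at hget
          exact Option.some_inj.mp hget
        conv_lhs => rw [← List.dropLast_concat_getLast hpne]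
        rw [hlast]
      have hF : F = pre' ++ c :: F.drop p.toNat := by
        conv_lhs => rw [← List.take_append_drop p.toNat F]
        rw [hpre']
        simp
      have hins' : PySem.List.insert F (idx + 1) key = pre' ++ c :: key :: F.drop p.toNat := by
        rw [hins, hpre']
        simp
      rw [hins']
      have hknotin : key ∉ pre' ++ c :: F.drop p.toNat := by rw [← hF]; exact hk
      have hnd' : (pre' ++ c :: key :: F.drop p.toNat).Nodup := by
        have hperm : (pre' ++ c :: key :: F.drop p.toNat).Perm (key :: (pre' ++ c :: F.drop p.toNat)) := by
          have h1 := List.perm_middle (a := key) (l₁ := pre' ++ [c]) (l₂ := F.drop p.toNat)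
          simpa using h1
        exact hperm.nodup_iff.mpr (List.nodup_cons.mpr ⟨hknotin, hF ▸ hnd⟩)
      refine ⟨by omega, hnd', ?_, ?_, ?_⟩
      · exact pvChain_splice succ head pre' (F.drop p.toNat) c key (hF ▸ hch) (hF ▸ hnd) hknotin
      · intro k
        rw [PySem.Dict.contains_insert, PySem.Dict.contains_insert]
        have hmemF := hmem k
        rw [hF] at hmemF
        simp only [List.mem_append, List.mem_cons] at hmemF ⊢
        by_cases hkc : k = c
        · subst hkc
          simp
        · by_cases hkk : k = key
          · subst hkk
            simp
          · have hbc : (k == c) = false := by simp [hkc]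
            have hbk : (k == key) = false := by simp [hkk]
            rw [hbc, hbk]
            simp only [Bool.false_or]
            rw [hmemF]
            tauto
      · -- cur' = some key = last of the new prefix
        have hplen : pre'.length + 1 = p.toNat := by
          have := congrArg List.length hpre'
          simp at this
          simp [hp] at this ⊢
          omega
        have hmin : (min (idx + 1 + 1) (((pre' ++ c :: key :: F.drop p.toNat).length : Nat) : Int)).toNat = p.toNat + 1 := by
          simp only [List.length_append, List.length_cons]
          have hple : p.toNat ≤ F.length := by omega
          have hFlen : F.length = pre'.length + 1 + (F.drop p.toNat).length := by
            conv_lhs => rw [hF]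
            simp
            omega
          push_cast
          omega
        rw [hmin]
        have htk : (pre' ++ c :: key :: F.drop p.toNat).take (p.toNat + 1) = pre' ++ [c, key] := by
          have h2 : pre' ++ c :: key :: F.drop p.toNat = (pre' ++ [c, key]) ++ F.drop p.toNat := by simp
          rw [h2, List.take_append_of_le_length (by simp; omega)]
          rw [List.take_of_length_le (by simp; omega)]
        rw [htk]
        simp

theorem pvFoldInv (keys : List String) :
    ∀ (F : List String) (idx : Int) (succ : PySem.Dict String (Option String))
      (head cur : Option String), pvInv F idx succ head cur →
    pvInv (keys.foldl pvAStep (F, idx)).1 (keys.foldl pvAStep (F, idx)).2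
      (keys.foldl pvBStep (succ, head, cur)).1
      (keys.foldl pvBStep (succ, head, cur)).2.1
      (keys.foldl pvBStep (succ, head, cur)).2.2 := by
  induction keys with
  | nil => intro F idx succ head cur h; exact h
  | cons k ks ih =>
    intro F idx succ head cur h
    have h' := pvStepInv F idx succ head cur k h
    simpa only [List.foldl_cons, Prod.mk.eta] using
      ih (pvAStep (F, idx) k).1 (pvAStep (F, idx) k).2
        (pvBStep (succ, head, cur) k).1 (pvBStep (succ, head, cur) k).2.1
        (pvBStep (succ, head, cur) k).2.2 h'

-- invariant between the outer loops, across dicts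
def pvOInv (F : List String) (succ : PySem.Dict String (Option String))
    (head : Option String) : Prop :=
  F.Nodup ∧ pvChain succ head F ∧ (∀ k, succ.contains k = true ↔ k ∈ F)

theorem pvStartInv (F : List String) (succ : PySem.Dict String (Option String))
    (head : Option String) (h : pvOInv F succ head) : pvInv F 0 succ head head := by
  obtain ⟨hnd, hch, hmem⟩ := h
  refine ⟨le_refl 0, hnd, hch, hmem, ?_⟩
  cases F with
  | nil => exact hch
  | cons x xs =>
    have hhead : head = some x := hch.1
    have : (min ((0 : Int) + 1) (((x :: xs).length : Nat) : Int)).toNat = 1 := by simp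
    rw [this, hhead]
    simp

theorem pvOuterInv (lod : List (List (String × String))) :
    ∀ (F : List String) (succ : PySem.Dict String (Option String)) (head : Option String),
    pvOInv F succ head →
    pvOInv (lod.foldl (fun fieldnames dict_ => ((PySem.Dict.ofList dict_).keys.foldl pvAStep (fieldnames, 0)).1) F)
      (lod.foldl (fun st dict_ =>
        let r := (PySem.Dict.ofList dict_).keys.foldl pvBStep (st.1, st.2, st.2)
        (r.1, r.2.1)) (succ, head)).1
      (lod.foldl (fun st dict_ =>
        let r := (PySem.Dict.ofList dict_).keys.foldl pvBStep (st.1, st.2, st.2)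
        (r.1, r.2.1)) (succ, head)).2 := by
  induction lod with
  | nil => intro F succ head h; exact h
  | cons d ds ih =>
    intro F succ head h
    have hin := pvFoldInv (PySem.Dict.ofList d).keys F 0 succ head head (pvStartInv F succ head h)
    obtain ⟨-, hnd', hch', hmem', -⟩ := hin
    exact ih _ _ _ ⟨hnd', hch', hmem'⟩

-- the schema walk reproduces A's fieldnames list
theorem pvFieldsEq (lod : List (List (String × String))) :
    pvBWalk (pvBSchema lod).1.size (pvBSchema lod).1 (pvBSchema lod).2 = pvAFields lod := by
  have h0 : pvOInv [] PySem.Dict.empty none := by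
    refine ⟨List.nodup_nil, rfl, ?_⟩
    intro k
    simp [PySem.Dict.contains, PySem.Dict.empty]
  have h := pvOuterInv lod [] PySem.Dict.empty none h0
  obtain ⟨hnd, hch, hmem⟩ := h
  set F := pvAFields lod
  set succ := (pvBSchema lod).1
  have hsub : F ⊆ succ.keys := by
    intro k hk
    exact (PySem.Dict.contains_iff_mem_keys succ k).mp ((hmem k).mpr hk)
  have hlen : F.length ≤ succ.size := by
    have h1 : F.length ≤ succ.keys.length := (List.Nodup.subperm hnd hsub).length_le
    have h2 : succ.keys.length = succ.size := by
      simp [PySem.Dict.keys, PySem.Dict.size]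
    omega
  exact pvWalk_chain hch succ.size hlen

-- ===== VERDICT (by name: the statement is the Claim_ definition above) =====
theorem convert_list_of_dicts_to_list_of_list_spec : Claim_equal_convert_list_of_dicts_to_list_of_list := by
  intro lod mv _
  show convert_list_of_dicts_to_list_of_list lod mv = convert_list_of_dicts_to_list_of_list_alt lod mv
  unfold convert_list_of_dicts_to_list_of_list convert_list_of_dicts_to_list_of_list_alt
  rw [PySem.List.foldl_append_singleton_eq_map
    (fun dict_ => (pvAFields lod).map (fun key => (PySem.Dict.ofList dict_).getD key mv)) lod [pvAFields lod]]
  simp only [pvFieldsEq]
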